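-- pv_equiv track=rewrite | github.com/p-lots/codewars | 6-kyu/mexican-wave/python/solution.py | wave
-- ===== SOURCE A (Python) =====
-- def wave(word):
--     ret = []
--     for i in range(len(word)):
--         if not word[i].isalpha():
--             continue
--         if i == 0:
--             ret.append(word[i].upper() + word[i+1:])
--         elif i < len(word) - 1:
--             ret.append(word[:i] + word[i].upper() + word[i + 1:])
--         else:
--             ret.append(word[:i] + word[i].upper())
--     return ret
-- ===== SOURCE B (Python) =====
-- def wave(word):
--     if len(word) <= 1:
--         return [word.upper()] if word.isalpha() else []
--     mid = len(word) // 2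
--     left, right = word[:mid], word[mid:]
--     return [w + right for w in wave(left)] + [left + w for w in wave(right)]
-- ===== Notes on version B (the rewrite author's own statement) =====
-- stated objective: alternative
-- what changed: B replaces A's index loop with three-way slice concatenation per position by a divide-and-conquer recursion: split the word at the midpoint, wave each half, and stitch the sub-results with the other half (w + right / left + w); no indices are inspected.
import Mathlib
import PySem

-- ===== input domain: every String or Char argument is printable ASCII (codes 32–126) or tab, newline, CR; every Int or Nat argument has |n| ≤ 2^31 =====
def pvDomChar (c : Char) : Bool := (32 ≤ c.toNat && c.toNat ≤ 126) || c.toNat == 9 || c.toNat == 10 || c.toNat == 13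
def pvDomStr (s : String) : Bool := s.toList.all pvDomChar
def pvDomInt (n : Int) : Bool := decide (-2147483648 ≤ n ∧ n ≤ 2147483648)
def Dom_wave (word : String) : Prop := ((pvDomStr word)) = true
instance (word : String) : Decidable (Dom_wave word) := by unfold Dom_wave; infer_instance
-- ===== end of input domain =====

-- B replaces A's index loop with three-way slice concatenation by a recursive
-- divide-and-conquer on the two halves of the word (alternative; same cost).

-- ===== PORT A =====
-- A: for i in range(len(word)): skip non-alpha; three branches of slice concatenation.
def wave (word : String) : List String :=
  let s := word.toList
  (List.range s.length).foldl (fun ret i =>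
    if ¬ PySem.Chars.isalpha (s.getD i ' ') then ret      -- i < len, so getD is word[i]
    else if i = 0 then
      ret ++ [String.ofList (PySem.Chars.upperChar (s.getD i ' ') ::
                PySem.List.slice s (some ((i : Int) + 1)) none)]
    else if i < s.length - 1 then
      ret ++ [String.ofList (PySem.List.slice s none (some (i : Int)) ++
                [PySem.Chars.upperChar (s.getD i ' ')] ++
                PySem.List.slice s (some ((i : Int) + 1)) none)]
    else
      ret ++ [String.ofList (PySem.List.slice s none (some (i : Int)) ++
                [PySem.Chars.upperChar (s.getD i ' ')])]) []

-- ===== PORT B =====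
-- B: if len ≤ 1, [word.upper()] when word.isalpha() else []; otherwise split at mid
-- and stitch: [w + right for w in wave(left)] + [left + w for w in wave(right)].
-- Ported over the word's char list; String.ofList rebuilds the strings at the end.
def waveChars (s : List Char) : List (List Char) :=
  if s.length ≤ 1 then
    if s.all PySem.Chars.isalpha && !s.isEmpty then [s.map PySem.Chars.upperChar] else []
  else
    (waveChars (s.take (s.length / 2))).map (fun w => w ++ s.drop (s.length / 2)) ++
      (waveChars (s.drop (s.length / 2))).map (fun w => s.take (s.length / 2) ++ w)
termination_by s.length
decreasing_by
  · simp only [List.length_take]; omega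
  · simp only [List.length_drop]; omega

def wave_alt (word : String) : List String :=
  (waveChars word.toList).map String.ofList

-- ===== PRECONDITION & SPEC =====
def Spec_wave (word : String) (out : List String) : Prop := out = wave_alt word
instance (word : String) (out : List String) : Decidable (Spec_wave word out) := by unfold Spec_wave; infer_instance

-- ===== CLAIM (what is proved, stated in full; the proofs are below) =====
def Claim_equal_wave : Prop := ∀ (word : String), Dom_wave word → Spec_wave word (wave word)

-- ===== LEMMAS AND PROOFS =====

-- For an in-range index, every branch of A's slice concatenation joins to `set i (upper s[i])`.
theorem wave_body_eq (s : List Char) (i : Nat) (h : i < s.length) (ret : List String) :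
    (if ¬ PySem.Chars.isalpha (s.getD i ' ') then ret
     else if i = 0 then
       ret ++ [String.ofList (PySem.Chars.upperChar (s.getD i ' ') ::
                 PySem.List.slice s (some ((i : Int) + 1)) none)]
     else if i < s.length - 1 then
       ret ++ [String.ofList (PySem.List.slice s none (some (i : Int)) ++
                 [PySem.Chars.upperChar (s.getD i ' ')] ++
                 PySem.List.slice s (some ((i : Int) + 1)) none)]
     else
       ret ++ [String.ofList (PySem.List.slice s none (some (i : Int)) ++
                 [PySem.Chars.upperChar (s.getD i ' ')])]) =
    (if PySem.Chars.isalpha (s.getD i ' ') then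
       ret ++ [String.ofList (s.set i (PySem.Chars.upperChar (s.getD i ' ')))]
     else ret) := by
  by_cases ha : PySem.Chars.isalpha (s.getD i ' ') = true
  · rw [if_pos ha, if_neg (not_not_intro ha)]
    have hslice1 : PySem.List.slice s (some ((i : Int) + 1)) none = s.drop (i + 1) := by
      have hc : ((i : Int) + 1) = ((i + 1 : Nat) : Int) := by push_cast; ring
      rw [hc, PySem.List.slice_from_natCast]
    have hslice0 : PySem.List.slice s none (some (i : Int)) = s.take i :=
      PySem.List.slice_to_natCast ..
    have hset : s.set i (PySem.Chars.upperChar (s.getD i ' ')) =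
        s.take i ++ PySem.Chars.upperChar (s.getD i ' ') :: s.drop (i + 1) := by
      rw [List.set_eq_take_append_cons_drop, if_pos h]
    by_cases h0 : i = 0
    · rw [if_pos h0, hslice1, hset, h0]
      simp
    · by_cases hm : i < s.length - 1
      · rw [if_neg h0, if_pos hm, hslice0, hslice1, hset]
        simp
      · have hdrop : s.drop (i + 1) = [] := by
          apply List.drop_eq_nil_of_le; omega
        rw [if_neg h0, if_neg hm, hslice0, hset, hdrop]
  · rw [if_pos ha, if_neg ha]

-- The index-filter characterisation shared by both proofs.
def waveSpec (s : List Char) : List (List Char) :=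
  ((List.range s.length).filter (fun i => PySem.Chars.isalpha (s.getD i ' '))).map
    (fun i => s.set i (PySem.Chars.upperChar (s.getD i ' ')))

-- waveSpec splits over append: indices below |l| edit l, the rest edit r (shifted).
theorem waveSpec_append (l r : List Char) :
    waveSpec (l ++ r) = (waveSpec l).map (fun w => w ++ r) ++ (waveSpec r).map (fun w => l ++ w) := by
  unfold waveSpec
  rw [List.length_append, List.range_add, List.filter_append, List.map_append]
  congr 1
  · have hfilter : (List.range l.length).filter
          (fun i => PySem.Chars.isalpha ((l ++ r).getD i ' '))
        = (List.range l.length).filter (fun i => PySem.Chars.isalpha (l.getD i ' ')) := by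
      apply List.filter_congr
      intro i hi
      have hil : i < l.length := List.mem_range.mp hi
      simp [List.getD, List.getElem?_append_left hil]
    rw [hfilter, List.map_map]
    apply List.map_congr_left
    intro i hi
    have hil : i < l.length := List.mem_range.mp (List.mem_of_mem_filter hi)
    simp [List.getElem?_append_left hil, hil]
  · rw [List.filter_map, List.map_map]
    have hfilter : (List.range r.length).filter
          ((fun i => PySem.Chars.isalpha ((l ++ r).getD i ' ')) ∘ (fun x => l.length + x))
        = (List.range r.length).filter (fun j => PySem.Chars.isalpha (r.getD j ' ')) := by
      apply List.filter_congr
      intro j hj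
      simp [List.getD, List.getElem?_append_right]
    rw [hfilter, List.map_map]
    apply List.map_congr_left
    intro j hj
    simp [List.getElem?_append_right]

-- B's divide-and-conquer computes waveSpec.
theorem waveChars_eq (s : List Char) : waveChars s = waveSpec s := by
  fun_induction waveChars s with
  | case1 s h hbase =>
    match s, h with
    | [], _ => simp at hbase
    | [c], _ =>
      simp only [List.all_cons, List.all_nil, Bool.and_true, List.isEmpty_cons] at hbase ⊢
      simp only [Bool.not_false, Bool.and_true] at hbase
      simp [waveSpec, List.range_succ, hbase]
  | case2 s h hbase =>
    match s, h with
    | [], _ => simp [waveSpec]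
    | [c], _ =>
      simp only [List.all_cons, List.all_nil, Bool.and_true, List.isEmpty_cons,
        Bool.not_false, Bool.and_true] at hbase
      have hc : PySem.Chars.isalpha c = false := by
        cases hx : PySem.Chars.isalpha c
        · rfl
        · exact absurd hx hbase
      simp [waveSpec, List.range_succ, hc]
  | case3 s h ih1 ih2 =>
    rw [ih1, ih2, ← waveSpec_append, List.take_append_drop]

theorem wave_eq_alt (word : String) : wave word = wave_alt word := by
  unfold wave wave_alt
  rw [waveChars_eq, waveSpec]
  have h1 : (List.range word.toList.length).foldl (fun ret i =>
      if ¬ PySem.Chars.isalpha (word.toList.getD i ' ') then ret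
      else if i = 0 then
        ret ++ [String.ofList (PySem.Chars.upperChar (word.toList.getD i ' ') ::
                  PySem.List.slice word.toList (some ((i : Int) + 1)) none)]
      else if i < word.toList.length - 1 then
        ret ++ [String.ofList (PySem.List.slice word.toList none (some (i : Int)) ++
                  [PySem.Chars.upperChar (word.toList.getD i ' ')] ++
                  PySem.List.slice word.toList (some ((i : Int) + 1)) none)]
      else
        ret ++ [String.ofList (PySem.List.slice word.toList none (some (i : Int)) ++
                  [PySem.Chars.upperChar (word.toList.getD i ' ')])]) [] =
      (List.range word.toList.length).foldl (fun ret i =>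
        if PySem.Chars.isalpha (word.toList.getD i ' ') then
          ret ++ [String.ofList (word.toList.set i (PySem.Chars.upperChar (word.toList.getD i ' ')))]
        else ret) [] := by
    apply PySem.List.foldl_congr_mem
    intro acc i hi
    exact wave_body_eq word.toList i (List.mem_range.mp hi) acc
  rw [h1, PySem.List.foldl_append_if, List.map_map]
  simp [Function.comp_def]

-- ===== VERDICT (by name: the statement is the Claim_ definition above) =====
theorem wave_spec : Claim_equal_wave := fun word _ => wave_eq_alt word
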